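-- pv_equiv track=rewrite | github.com/zhakhverdyan/Capstone2-efficient-ECG-review | src/record_plot.py | labelTranslation
-- ===== SOURCE A (Python) =====
-- def labelTranslation(annot_symbols):
--     """Encole beat labels into 4 major classes"""
--     annot_symbols_relabeled = []
--     for label in annot_symbols:
--         if label in ['N', 'L', 'R', 'e', 'j']:
--             annot_symbols_relabeled.append('N')
--         elif label in ['A', 'a', 'J', 'S']:
--             annot_symbols_relabeled.append('S')
--         elif label in ['V', 'E']:
--             annot_symbols_relabeled.append('V')
--         elif label=='F':
--             annot_symbols_relabeled.append('F')
--         else: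
--             annot_symbols_relabeled.append('')
--     return annot_symbols_relabeled
-- ===== SOURCE B (Python) =====
-- _GROUPS = [('N', frozenset(['N', 'L', 'R', 'e', 'j'])),
--            ('S', frozenset(['A', 'a', 'J', 'S'])),
--            ('V', frozenset(['V', 'E'])),
--            ('F', frozenset(['F']))]
--
-- def labelTranslation(annot_symbols):
--     """Encode beat labels into 4 major classes: preallocate a '' result and
--     fill it with one sweep per class, writing the class at matching positions."""
--     out = [''] * len(annot_symbols)
--     for cls, members in _GROUPS:
--         for i, label in enumerate(annot_symbols):
--             if label in members:
--                 out[i] = cls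
--     return out
-- ===== Notes on version B (the rewrite author's own statement) =====
-- stated objective: alternative
-- what changed: Instead of classifying each element once through a membership cascade, B preallocates an all-empty result of the same length and makes one separate sweep per class, writing that class into the result at matching indices (correct because the four symbol groups are disjoint).
import Mathlib
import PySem

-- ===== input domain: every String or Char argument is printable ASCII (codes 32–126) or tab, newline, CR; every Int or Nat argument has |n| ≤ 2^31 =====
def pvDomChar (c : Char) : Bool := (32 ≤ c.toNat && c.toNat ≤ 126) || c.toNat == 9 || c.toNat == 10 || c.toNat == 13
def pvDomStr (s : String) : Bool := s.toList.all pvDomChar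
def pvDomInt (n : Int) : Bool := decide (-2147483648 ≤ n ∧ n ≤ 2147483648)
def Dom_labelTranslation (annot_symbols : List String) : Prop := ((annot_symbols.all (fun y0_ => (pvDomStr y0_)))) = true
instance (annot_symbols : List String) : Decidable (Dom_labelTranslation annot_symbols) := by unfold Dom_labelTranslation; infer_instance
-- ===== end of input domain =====

-- B replaces A's single pass with a per-element membership cascade by a preallocated
-- all-'' result filled with one sweep per class (the four symbol groups are disjoint);
-- alternative decomposition, same cost.
-- ===== PORT A =====
-- port of A: fold over the labels, appending per the membership-test cascade
def labelTranslation (annot_symbols : List String) : List String :=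
  annot_symbols.foldl (fun acc label =>
    if label ∈ ["N", "L", "R", "e", "j"] then acc ++ ["N"]
    else if label ∈ ["A", "a", "J", "S"] then acc ++ ["S"]
    else if label ∈ ["V", "E"] then acc ++ ["V"]
    else if label = "F" then acc ++ ["F"]
    else acc ++ [""]) []

-- ===== PORT B =====
-- the fixed (class, member set) groups; frozensets of distinct single-symbol strings
def pvGroups : List (String × PySem.Set String) :=
  [("N", PySem.Set.ofList ["N", "L", "R", "e", "j"]),
   ("S", PySem.Set.ofList ["A", "a", "J", "S"]),
   ("V", PySem.Set.ofList ["V", "E"]),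
   ("F", PySem.Set.ofList ["F"])]

-- port of B: inner sweep 'for i, label in enumerate(annot_symbols): if label in members: out[i] = cls'
def pvSweep (cls : String) (members : PySem.Set String)
    (annot_symbols : List String) (out : List String) : List String :=
  (PySem.List.enumerate annot_symbols).foldl
    (fun out p => if p.2 ∈ members then out.set p.1.toNat cls else out) out

def labelTranslation_alt (annot_symbols : List String) : List String :=
  pvGroups.foldl (fun out g => pvSweep g.1 g.2 annot_symbols out)
    (List.replicate annot_symbols.length "")

-- ===== PRECONDITION & SPEC =====
def Spec_labelTranslation (annot_symbols : List String) (out : List String) : Prop := out = labelTranslation_alt annot_symbols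
instance (annot_symbols : List String) (out : List String) : Decidable (Spec_labelTranslation annot_symbols out) := by unfold Spec_labelTranslation; infer_instance

-- ===== CLAIM (what is proved, stated in full; the proofs are below) =====
def Claim_equal_labelTranslation : Prop := ∀ (annot_symbols : List String), Dom_labelTranslation annot_symbols → Spec_labelTranslation annot_symbols (labelTranslation annot_symbols)

-- ===== LEMMAS AND PROOFS =====

-- a sweep starting at offset pre.length rewrites exactly the 'cur' part, elementwise
theorem sweep_closed (cls : String) (members : PySem.Set String) :
    ∀ (l : List String) (pre cur : List String), cur.length = l.length →
    (PySem.List.enumerate l (pre.length : Int)).foldl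
      (fun out p => if p.2 ∈ members then out.set p.1.toNat cls else out) (pre ++ cur)
    = pre ++ List.zipWith (fun lab o => if lab ∈ members then cls else o) l cur := by
  intro l
  induction l with
  | nil =>
    intro pre cur h
    have hc : cur = [] := List.length_eq_zero_iff.mp (by simpa using h)
    subst hc; simp [PySem.List.enumerate]
  | cons a l ih =>
    intro pre cur h
    cases cur with
    | nil => simp at h
    | cons c cur =>
      simp only [PySem.List.enumerate_cons, List.foldl_cons, List.zipWith_cons_cons]
      have key : (if a ∈ members then (pre ++ c :: cur).set ((pre.length : Int)).toNat cls
            else pre ++ c :: cur)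
          = (pre ++ [if a ∈ members then cls else c]) ++ cur := by
        split <;> simp
      rw [key]
      have hlen : ((pre.length : Int) + 1) = (((pre ++ [if a ∈ members then cls else c]).length : Nat) : Int) := by
        simp
      rw [hlen, ih (pre ++ [if a ∈ members then cls else c]) cur (by simpa using h)]
      simp

theorem sweep_eq (cls : String) (members : PySem.Set String) (l cur : List String)
    (h : cur.length = l.length) :
    pvSweep cls members l cur
      = List.zipWith (fun lab o => if lab ∈ members then cls else o) l cur := by
  have := sweep_closed cls members l [] cur h
  simpa [pvSweep] using this

-- A's per-element cascade value
def pvCasc (label : String) : String :=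
  if label ∈ ["N", "L", "R", "e", "j"] then "N"
  else if label ∈ ["A", "a", "J", "S"] then "S"
  else if label ∈ ["V", "E"] then "V"
  else if label = "F" then "F"
  else ""

-- A's fold is a map of the cascade
theorem A_foldl_eq (l acc : List String) :
    l.foldl (fun acc label =>
      if label ∈ ["N", "L", "R", "e", "j"] then acc ++ ["N"]
      else if label ∈ ["A", "a", "J", "S"] then acc ++ ["S"]
      else if label ∈ ["V", "E"] then acc ++ ["V"]
      else if label = "F" then acc ++ ["F"]
      else acc ++ [""]) acc = acc ++ l.map pvCasc := by
  induction l generalizing acc with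
  | nil => simp
  | cons a l ih =>
    simp only [List.foldl_cons, List.map_cons, ih, pvCasc]
    split_ifs <;> simp

-- one element through the four sweeps equals the cascade (the groups are disjoint)
theorem elem_eq (a : String) :
    (if a ∈ (["F"] : List String) then "F"
     else if a ∈ (["V", "E"] : List String) then "V"
     else if a ∈ (["A", "a", "J", "S"] : List String) then "S"
     else if a ∈ (["N", "L", "R", "e", "j"] : List String) then "N"
     else "") = pvCasc a := by
  unfold pvCasc
  simp only [List.mem_cons, List.not_mem_nil, or_false]
  by_cases h1 : a = "N" ∨ a = "L" ∨ a = "R" ∨ a = "e" ∨ a = "j"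
  · rcases h1 with h | h | h | h | h <;> subst h <;> rfl
  · by_cases h2 : a = "A" ∨ a = "a" ∨ a = "J" ∨ a = "S"
    · rcases h2 with h | h | h | h <;> subst h <;> rfl
    · by_cases h3 : a = "V" ∨ a = "E"
      · rcases h3 with h | h <;> subst h <;> rfl
      · by_cases h4 : a = "F"
        · subst h4; rfl
        · simp [h1, h2, h3, h4]

-- the four zipWith sweeps over a fresh '' list compute the cascade map
theorem chain_eq (l : List String) :
    List.zipWith (fun lab o => if lab ∈ (PySem.Set.ofList ["F"] : List String) then "F" else o) l
      (List.zipWith (fun lab o => if lab ∈ (PySem.Set.ofList ["V", "E"] : List String) then "V" else o) l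
        (List.zipWith (fun lab o => if lab ∈ (PySem.Set.ofList ["A", "a", "J", "S"] : List String) then "S" else o) l
          (List.zipWith (fun lab o => if lab ∈ (PySem.Set.ofList ["N", "L", "R", "e", "j"] : List String) then "N" else o) l
            (List.replicate l.length ""))))
    = l.map pvCasc := by
  induction l with
  | nil => rfl
  | cons a l ih =>
    simp only [List.length_cons, List.replicate_succ, List.zipWith_cons_cons, List.map_cons, ih]
    congr 1
    simp only [PySem.Set.mem_ofList]
    exact elem_eq a

-- ===== VERDICT (by name: the statement is the Claim_ definition above) =====
theorem labelTranslation_spec : Claim_equal_labelTranslation := by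
  intro xs _
  unfold Spec_labelTranslation labelTranslation labelTranslation_alt pvGroups
  simp only [List.foldl_cons, List.foldl_nil]
  rw [A_foldl_eq xs []]
  rw [sweep_eq "N" (PySem.Set.ofList ["N", "L", "R", "e", "j"]) xs _ (by simp)]
  rw [sweep_eq "S" (PySem.Set.ofList ["A", "a", "J", "S"]) xs _ (by simp)]
  rw [sweep_eq "V" (PySem.Set.ofList ["V", "E"]) xs _ (by simp)]
  rw [sweep_eq "F" (PySem.Set.ofList ["F"]) xs _ (by simp)]
  simpa using (chain_eq xs).symm
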